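-- pv_equiv track=rewrite | github.com/yesongO/coding_test | 프로그래머스/0/181932. 코드 처리하기/코드 처리하기.py | solution
-- ===== SOURCE A (Python) =====
-- def solution(code):  # code는 소문자 또는 1로 구성된 문자열
--     ret = ''
--     cur_mode = 0
--
--     for idx in range(len(code)):
--         if cur_mode == 0: # 현재 모드가 0일 경우
--             if code[idx] == "1": # "1" 일 경우 모드 바꾸기
--                 cur_mode = 1
--             elif idx % 2 == 0: # idx가 짝수일 경우
--                 ret += code[idx]
--
--         else: # 현재 모드가 1일 경우
--             if code[idx] == "1": # "1" 일 경우 모드 바꾸기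
--                 cur_mode = 0
--             elif idx % 2 != 0:
--                 ret += code[idx]
--
--     if ret == '':
--         return "EMPTY"
--
--     return ret
-- ===== SOURCE B (Python) =====
-- def solution(code):
--     # Split the code at every '1': segment k is processed in mode k % 2, and a
--     # character at absolute index i is kept iff i % 2 == k % 2, i.e. each segment
--     # contributes a stride-2 slice starting at offset (k + pos) % 2 of that segment,
--     # where pos is the segment's absolute start index.
--     out = []
--     pos = 0
--     for k, seg in enumerate(code.split("1")):
--         out.append(seg[(k + pos) % 2::2])
--         pos += len(seg) + 1
--     s = "".join(out)
--     return s if s else "EMPTY"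
-- ===== Notes on version B (the rewrite author's own statement) =====
-- stated objective: faster
-- what changed: Instead of A's char-by-char Python loop with a mode flag toggled on each '1', B splits the string on '1' and emits, for each segment, a stride-2 slice whose offset is fixed by the parity of the segment number plus its start position (mode during segment k is k % 2).
import Mathlib
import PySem

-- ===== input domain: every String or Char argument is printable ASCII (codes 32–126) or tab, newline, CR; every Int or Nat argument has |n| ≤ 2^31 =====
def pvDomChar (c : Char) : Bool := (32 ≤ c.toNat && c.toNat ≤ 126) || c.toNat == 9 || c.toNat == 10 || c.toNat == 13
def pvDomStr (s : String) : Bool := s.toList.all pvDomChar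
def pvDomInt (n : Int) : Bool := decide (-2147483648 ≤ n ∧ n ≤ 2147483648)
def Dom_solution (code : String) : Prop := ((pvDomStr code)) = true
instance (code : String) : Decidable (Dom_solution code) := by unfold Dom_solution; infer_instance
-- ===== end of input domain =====

-- B replaces A's per-character toggle loop by split-on-'1' plus a stride-2 slice per segment: same O(n), measured constant-factor faster (bulk str.split/slicing instead of per-char Python steps).


-- ===== PORT A =====
-- A's for-loop over range(len(code)) with the running mode toggle; ret += c becomes cons on the recursive suffix.
def solutionLoop (cs : List Char) (idx : Nat) (curMode : Nat) : List Char :=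
  match cs with
  | [] => []
  | c :: t =>
    if curMode = 0 then
      if c = '1' then solutionLoop t (idx + 1) 1
      else if idx % 2 = 0 then c :: solutionLoop t (idx + 1) curMode
      else solutionLoop t (idx + 1) curMode
    else
      if c = '1' then solutionLoop t (idx + 1) 0
      else if idx % 2 ≠ 0 then c :: solutionLoop t (idx + 1) curMode
      else solutionLoop t (idx + 1) curMode

def solution (code : String) : String :=
  let ret := solutionLoop code.toList 0 0
  if ret = [] then "EMPTY" else String.ofList ret

-- ===== PORT B =====
-- seg[o::2] : Python's stride-2 slice; step 2 ≠ 0, so slice? is never none and getD's default is dead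
def solutionStride (seg : List Char) (o : Nat) : List Char :=
  (PySem.List.slice? seg (some (o : Int)) none 2).getD []

-- the for-loop over enumerate(code.split("1")) with the running absolute position pos
def solutionSegs (segs : List (List Char)) (k : Nat) (pos : Nat) : List Char :=
  match segs with
  | [] => []
  | seg :: rest => solutionStride seg ((k + pos) % 2) ++ solutionSegs rest (k + 1) (pos + seg.length + 1)

def solution_alt (code : String) : String :=
  -- code.split("1") ported as the corresponding library function List.splitOn
  let s := solutionSegs (code.toList.splitOn '1') 0 0
  if s = [] then "EMPTY" else String.ofList s

-- ===== PRECONDITION & SPEC =====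
def Spec_solution (code : String) (out : String) : Prop := out = solution_alt code
instance (code : String) (out : String) : Decidable (Spec_solution code out) := by unfold Spec_solution; infer_instance

-- ===== CLAIM (what is proved, stated in full; the proofs are below) =====
def Claim_equal_solution : Prop := ∀ (code : String), Dom_solution code → Spec_solution code (solution code)

-- ===== LEMMAS AND PROOFS =====
-- keep every other element, starting with the first (the shape of a stride-2 slice)
def everyOther : List Char → List Char
  | [] => []
  | [x] => [x]
  | x :: _ :: t => x :: everyOther t

theorem everyOther_cons (c : Char) (s : List Char) :
    everyOther (c :: s) = c :: everyOther (s.drop 1) := by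
  cases s <;> simp [everyOther]

theorem filterMap_range_everyOther (ys : List Char) :
    (List.range ((ys.length + 1) / 2)).filterMap (fun k => ys[2 * k]?) = everyOther ys := by
  induction ys using everyOther.induct with
  | case1 => rfl
  | case2 x => simp [everyOther, List.range_succ]
  | case3 a b t ih =>
    have hlen : (a :: b :: t).length + 1 = (t.length + 1) + 2 := by simp [List.length_cons]
    have hcount : ((a :: b :: t).length + 1) / 2 = (t.length + 1) / 2 + 1 := by
      rw [hlen]; omega
    rw [hcount, List.range_succ_eq_map]
    simp only [List.filterMap_cons, List.filterMap_map]
    have h0 : (a :: b :: t)[2 * 0]? = some a := by simp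
    simp only [h0]
    have hshift : ∀ k : Nat, (a :: b :: t)[2 * (k + 1)]? = t[2 * k]? := by
      intro k
      have : 2 * (k + 1) = 2 * k + 1 + 1 := by omega
      simp [this]
    simp only [Function.comp_def, hshift, everyOther]
    rw [← ih]

theorem stride_eq (xs : List Char) (o : Nat) (ho : o ≤ 1) :
    solutionStride xs o = everyOther (xs.drop o) := by
  rcases Nat.eq_zero_or_pos xs.length with h0 | hpos
  · have : xs = [] := List.eq_nil_of_length_eq_zero h0
    subst this
    interval_cases o <;> rfl
  · -- 1 ≤ xs.length, so the clamped start is o itself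
    have hole : o ≤ xs.length := le_trans ho hpos
    unfold solutionStride PySem.List.slice? PySem.List.sliceIndices
    simp only [if_neg (by norm_num : ¬ (2 : Int) = 0)]
    have hlt : ¬ ((2 : Int) < 0) := by norm_num
    simp only [hlt, if_false, if_neg (by omega : ¬ (o : Int) < 0)]
    have hmin : min (o : Int) (xs.length : Int) = (o : Int) := by
      omega
    rw [hmin]
    by_cases hoe : (o : Int) < (xs.length : Int)
    · rw [if_pos hoe]
      have hc : (((xs.length : Int) - (o : Int) + 2 - 1) / 2).toNat
          = ((xs.drop o).length + 1) / 2 := by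
        simp only [List.length_drop]
        omega
      rw [hc, ← filterMap_range_everyOther (xs.drop o)]
      apply List.filterMap_congr
      intro k _
      have hidx : (((o : Int) + 2 * (k : Int)).toNat) = o + 2 * k := by omega
      rw [hidx]
      rw [List.getElem?_drop]
    · rw [if_neg hoe]
      have : xs.drop o = [] := by
        apply List.drop_eq_nil_of_le
        omega
      simp [this, everyOther]

theorem loop_eq_segs (cs : List Char) (k pos : Nat) :
    solutionLoop cs pos (k % 2) = solutionSegs (cs.splitOn '1') k pos := by
  induction cs generalizing k pos with
  | nil =>
    simp [solutionLoop, List.splitOn, solutionSegs,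
      stride_eq [] ((k + pos) % 2) (by omega), everyOther]
  | cons c t ih =>
    by_cases h1 : c = '1'
    · subst h1
      have hsplit : (('1' :: t).splitOn '1') = [] :: t.splitOn '1' := by
        simp [List.splitOn, List.splitOnP_cons]
      rw [hsplit]
      have hrhs : solutionSegs ([] :: t.splitOn '1') k pos
          = solutionSegs (t.splitOn '1') (k + 1) (pos + 1) := by
        simp [solutionSegs, stride_eq [] ((k + pos) % 2) (by omega), everyOther]
      rw [hrhs, ← ih (k + 1) (pos + 1)]
      rcases Nat.mod_two_eq_zero_or_one k with hk | hk <;>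
        simp [solutionLoop, hk, Nat.add_mod k 1 2]
    · -- non-'1' character: it heads the current segment
      obtain ⟨s, ss, hs⟩ : ∃ s ss, t.splitOn '1' = s :: ss := by
        rcases hss : t.splitOn '1' with _ | ⟨s, ss⟩
        · exact absurd hss (List.splitOnP_ne_nil _ _)
        · exact ⟨s, ss, rfl⟩
      have hs' : t.splitOnP (· == '1') = s :: ss := hs
      have hsplit : ((c :: t).splitOn '1') = (c :: s) :: ss := by
        simp [List.splitOn, List.splitOnP_cons, h1, hs']
      rw [hsplit]
      have hIH := ih k (pos + 1)
      rw [hs] at hIH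
      have harith : pos + 1 + s.length + 1 = pos + (c :: s).length + 1 := by
        simp; omega
      rcases Nat.mod_two_eq_zero_or_one (k + pos) with hkp | hkp
      · -- indices of matching parity start the segment: keep c
        have hked : pos % 2 = k % 2 := by omega
        have ho1 : (k + (pos + 1)) % 2 = 1 := by omega
        have heq : solutionSegs ((c :: s) :: ss) k pos
            = c :: (solutionStride s 1 ++ solutionSegs ss (k + 1) (pos + 1 + s.length + 1)) := by
          simp only [solutionSegs, hkp, harith]
          rw [stride_eq (c :: s) 0 (by omega), stride_eq s 1 (by omega)]
          simp [everyOther_cons]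
        rw [heq]
        have hlhs : solutionLoop (c :: t) pos (k % 2)
            = c :: solutionLoop t (pos + 1) (k % 2) := by
          rcases Nat.mod_two_eq_zero_or_one k with hk | hk <;>
            simp [solutionLoop, h1, show pos % 2 = k % 2 from hked, hk]
        rw [hlhs, hIH]
        simp [solutionSegs, ho1]
      · -- parity mismatch: drop c
        have hked : pos % 2 ≠ k % 2 := by omega
        have ho0 : (k + (pos + 1)) % 2 = 0 := by omega
        have heq : solutionSegs ((c :: s) :: ss) k pos
            = solutionStride s 0 ++ solutionSegs ss (k + 1) (pos + 1 + s.length + 1) := by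
          simp only [solutionSegs, hkp, harith]
          rw [stride_eq (c :: s) 1 (by omega), stride_eq s 0 (by omega)]
          simp
        rw [heq]
        have hlhs : solutionLoop (c :: t) pos (k % 2)
            = solutionLoop t (pos + 1) (k % 2) := by
          rcases Nat.mod_two_eq_zero_or_one k with hk | hk <;>
            simp [solutionLoop, h1, hk] <;> omega
        rw [hlhs, hIH]
        simp [solutionSegs, ho0]

-- ===== VERDICT (by name: the statement is the Claim_ definition above) =====
theorem solution_spec : Claim_equal_solution := by
  intro code _
  unfold Spec_solution solution solution_alt
  rw [show solutionLoop code.toList 0 0 = solutionLoop code.toList 0 (0 % 2) from rfl,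
    loop_eq_segs code.toList 0 0]
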